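-- pv_equiv track=rewrite | github.com/georgiashay/planet_x_server | game_generator.py | _game_code
-- ===== SOURCE A (Python) =====
-- def _game_code(i, length):
--     """
--     Construct the ith game code of length length. Game codes are in the format
--     <letter><number><letter><number>... The letters cannot be O/I, and the numbers
--     are 2-9. The 0th game code is A2A2...A2 for any given length.
--
--     length: The number of characters for the game code. Must be even.
--     i: The number of the game code to construct
--     """
--     code = ""
--     # Construct code, taking each letter-number pair one by one
--     while i > 0:
--         # Extract number by taking modulo
--         n = (i % 8) + 2
--         i = int(i/8)
--         # Extract letter index by taking modulo
--         l = i % 24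
--
--         # Turn letter index into a letter, skipping O and I
--         if l < 8:
--             c = chr(l + 65)
--         elif l < 13:
--             c = chr(l + 66)
--         else:
--             c = chr(l + 67)
--         i = int(i/24)
--         # Prepend letter-number pair to code
--         code = c + str(n) + code
--     # Pad with A2's
--     if len(code) < length:
--         code = "A2" * ((length - len(code))//2) + code
--     return code
-- ===== SOURCE B (Python) =====
-- LETTERS = "ABCDEFGHJKLMNPQRSTUVWXYZ"
--
--
-- def _game_code(i, length):
--     # Recursive formulation: strip the least-significant letter-number pair
--     # (one base-192 digit), recurse on the rest with two fewer characters to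
--     # fill, and append the pair after the recursive call; the "A2" padding is
--     # the base case, so there is no separate padding phase.
--     if i <= 0:
--         return "A2" * max(length // 2, 0)
--     q, d = divmod(i, 192)
--     return _game_code(q, length - 2) + LETTERS[d // 8] + str(d % 8 + 2)
-- ===== Notes on version B (the rewrite author's own statement) =====
-- stated objective: simpler
-- what changed: B is a short recursion instead of A's iterative loop-then-pad two-phase construction: it strips one letter-number pair per call, appends it after the recursive call (building most-significant-first by return order rather than by string prepending), and produces the A2 padding as the recursion's base case, eliminating the separate padding block; the letter comes from an alphabet table instead of three-way chr arithmetic.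
import Mathlib
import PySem

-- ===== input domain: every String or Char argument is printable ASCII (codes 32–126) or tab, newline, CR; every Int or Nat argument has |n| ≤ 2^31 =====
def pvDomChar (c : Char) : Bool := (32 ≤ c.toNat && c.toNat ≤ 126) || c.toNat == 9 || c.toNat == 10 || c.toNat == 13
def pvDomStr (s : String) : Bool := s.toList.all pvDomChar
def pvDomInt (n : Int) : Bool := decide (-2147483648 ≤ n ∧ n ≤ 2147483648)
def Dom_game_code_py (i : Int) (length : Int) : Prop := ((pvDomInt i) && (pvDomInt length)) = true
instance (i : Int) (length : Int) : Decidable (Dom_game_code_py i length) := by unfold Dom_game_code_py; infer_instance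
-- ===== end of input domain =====

-- B replaces A's loop-then-pad construction by a recursion whose base case is the padding (objective: simpler).

-- ===== PORT A =====
-- strings are carried as List Char (PySem.Chars domain); int(i/8)/int(i/24) on the
-- nonnegative loop values equal floor division, ported as PySem.Int.floordiv
def gameA_loop (i : Int) (code : List Char) : List Char :=
  if h : i > 0 then
    let n := PySem.Int.mod i 8 + 2
    let i1 := PySem.Int.floordiv i 8
    let l := PySem.Int.mod i1 24
    let c : Char :=
      if l < 8 then Char.ofNat (l + 65).toNat
      else if l < 13 then Char.ofNat (l + 66).toNat
      else Char.ofNat (l + 67).toNat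
    let i2 := PySem.Int.floordiv i1 24
    gameA_loop i2 (c :: PySem.Int.toChars n ++ code)
  else code
termination_by i.toNat
decreasing_by
  rw [PySem.Int.floordiv_eq_ediv_of_pos (by norm_num), PySem.Int.floordiv_eq_ediv_of_pos (by norm_num)]
  omega

def game_code_py (i : Int) (length : Int) : String :=
  let code := gameA_loop i []
  String.mk (if (code.length : Int) < length then
      PySem.List.pyRepeat ['A', '2'] (PySem.Int.floordiv (length - (code.length : Int)) 2) ++ code
    else code)

-- ===== PORT B =====
def pvLetters : List Char :=
  ['A','B','C','D','E','F','G','H','J','K','L','M','N','P','Q','R','S','T','U','V','W','X','Y','Z']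

-- LETTERS[d // 8]: the index is always in range (0 ≤ d = i % 192, d // 8 < 24), so the
-- total lookup (pyGet? + default, default never reached) is exact here
def gameB (i : Int) (length : Int) : List Char :=
  if h : i > 0 then
    let q := PySem.Int.floordiv i 192
    let d := PySem.Int.mod i 192
    gameB q (length - 2) ++
      (PySem.List.pyGet? pvLetters (PySem.Int.floordiv d 8)).getD 'A'
        :: PySem.Int.toChars (PySem.Int.mod d 8 + 2)
  else PySem.List.pyRepeat ['A', '2'] (max (PySem.Int.floordiv length 2) 0)
termination_by i.toNat
decreasing_by
  rw [PySem.Int.floordiv_eq_ediv_of_pos (by norm_num)]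
  omega

def game_code_py_alt (i : Int) (length : Int) : String :=
  String.mk (gameB i length)

-- ===== PRECONDITION & SPEC =====
def Spec_game_code_py (i : Int) (length : Int) (out : String) : Prop := out = game_code_py_alt i length
instance (i : Int) (length : Int) (out : String) : Decidable (Spec_game_code_py i length out) := by unfold Spec_game_code_py; infer_instance

-- ===== CLAIM (what is proved, stated in full; the proofs are below) =====
def Claim_equal_game_code_py : Prop := ∀ (i : Int) (length : Int), Dom_game_code_py i length → Spec_game_code_py i length (game_code_py i length)

-- ===== LEMMAS AND PROOFS =====

-- the accumulator of gameA_loop is only ever prepended to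
theorem gameA_loop_acc (i : Int) (code : List Char) :
    gameA_loop i code = gameA_loop i [] ++ code := by
  by_cases h : i > 0
  · rw [gameA_loop]
    conv_rhs => rw [gameA_loop]
    simp only [h, dif_pos]
    rw [gameA_loop_acc _ (_ :: _ ++ code), gameA_loop_acc _ (_ :: _ ++ [])]
    simp
  · rw [gameA_loop]
    conv_rhs => rw [gameA_loop]
    simp [h]
termination_by i.toNat
decreasing_by
  all_goals rw [PySem.Int.floordiv_eq_ediv_of_pos (by norm_num), PySem.Int.floordiv_eq_ediv_of_pos (by norm_num)]
  all_goals omega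

-- the three-way chr arithmetic equals the alphabet-table lookup on 0..23
theorem letter_table (l : Int) (h0 : 0 ≤ l) (h1 : l < 24) :
    (if l < 8 then Char.ofNat (l + 65).toNat
     else if l < 13 then Char.ofNat (l + 66).toNat
     else Char.ofNat (l + 67).toNat)
    = (PySem.List.pyGet? pvLetters l).getD 'A' := by
  interval_cases l <;> decide

-- str(n) is one character for n in 2..9
theorem toChars_len_one (n : Int) (h0 : 2 ≤ n) (h1 : n ≤ 9) :
    (PySem.Int.toChars n).length = 1 := by
  interval_cases n <;> decide

-- one step of A's loop strips exactly B's least-significant base-192 pair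
theorem gameA_step (i : Int) (h : i > 0) :
    gameA_loop i [] =
      gameA_loop (PySem.Int.floordiv i 192) [] ++
        (PySem.List.pyGet? pvLetters (PySem.Int.floordiv (PySem.Int.mod i 192) 8)).getD 'A'
          :: PySem.Int.toChars (PySem.Int.mod (PySem.Int.mod i 192) 8 + 2) := by
  rw [gameA_loop]
  simp only [h, dif_pos]
  rw [gameA_loop_acc]
  have e8 : PySem.Int.floordiv i 8 = i / 8 := PySem.Int.floordiv_eq_ediv_of_pos (by norm_num)
  have e24 : PySem.Int.floordiv (i / 8) 24 = i / 8 / 24 := PySem.Int.floordiv_eq_ediv_of_pos (by norm_num)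
  have e192 : PySem.Int.floordiv i 192 = i / 192 := PySem.Int.floordiv_eq_ediv_of_pos (by norm_num)
  have m8 : PySem.Int.mod i 8 = i % 8 := PySem.Int.mod_eq_emod_of_pos (by norm_num)
  have m24 : PySem.Int.mod (i / 8) 24 = i / 8 % 24 := PySem.Int.mod_eq_emod_of_pos (by norm_num)
  have m192 : PySem.Int.mod i 192 = i % 192 := PySem.Int.mod_eq_emod_of_pos (by norm_num)
  have ed8 : PySem.Int.floordiv (PySem.Int.mod i 192) 8 = i % 192 / 8 := by
    rw [m192]; exact PySem.Int.floordiv_eq_ediv_of_pos (by norm_num)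
  have hmod8 : PySem.Int.mod (PySem.Int.mod i 192) 8 = i % 8 := by
    rw [m192, PySem.Int.mod_eq_emod_of_pos (by norm_num)]; omega
  have hdiv : i / 8 / 24 = i / 192 := by omega
  have hl : i % 192 / 8 = i / 8 % 24 := by omega
  have hc : (if PySem.Int.mod (PySem.Int.floordiv i 8) 24 < 8 then
               Char.ofNat (PySem.Int.mod (PySem.Int.floordiv i 8) 24 + 65).toNat
             else if PySem.Int.mod (PySem.Int.floordiv i 8) 24 < 13 then
               Char.ofNat (PySem.Int.mod (PySem.Int.floordiv i 8) 24 + 66).toNat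
             else Char.ofNat (PySem.Int.mod (PySem.Int.floordiv i 8) 24 + 67).toNat)
      = (PySem.List.pyGet? pvLetters (PySem.Int.floordiv (PySem.Int.mod i 192) 8)).getD 'A' := by
    rw [ed8, hl, ← m24, ← e8]
    exact letter_table _ (by rw [e8, m24]; omega) (by rw [e8, m24]; omega)
  rw [hc, hmod8, m8, e8, e24, hdiv, ← e192]
  simp

-- main correspondence: B's recursion is A's loop output with A's padding in front
theorem gameB_eq (i : Int) (length : Int) :
    gameB i length =
      PySem.List.pyRepeat ['A', '2']
          (max (PySem.Int.floordiv (length - ((gameA_loop i []).length : Int)) 2) 0)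
        ++ gameA_loop i [] := by
  by_cases h : i > 0
  · rw [gameB]
    simp only [h, dif_pos]
    rw [gameB_eq (PySem.Int.floordiv i 192) (length - 2), gameA_step i h]
    have hm8 : PySem.Int.mod (PySem.Int.mod i 192) 8 = i % 8 := by
      rw [PySem.Int.mod_eq_emod_of_pos (a := i) (b := 192) (by norm_num),
        PySem.Int.mod_eq_emod_of_pos (by norm_num)]
      omega
    have hn2 : (2 : Int) ≤ i % 8 + 2 := by omega
    have hn9 : i % 8 + 2 ≤ 9 := by omega
    have hlen : ((gameA_loop (PySem.Int.floordiv i 192) [] ++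
        (PySem.List.pyGet? pvLetters (PySem.Int.floordiv (PySem.Int.mod i 192) 8)).getD 'A'
          :: PySem.Int.toChars (PySem.Int.mod (PySem.Int.mod i 192) 8 + 2)).length : Int)
        = ((gameA_loop (PySem.Int.floordiv i 192) []).length : Int) + 2 := by
      simp [hm8, toChars_len_one (i % 8 + 2) hn2 hn9]
    rw [hlen]
    have harg : length - 2 - ((gameA_loop (PySem.Int.floordiv i 192) []).length : Int)
        = length - (((gameA_loop (PySem.Int.floordiv i 192) []).length : Int) + 2) := by ring
    rw [harg]
    simp
  · rw [gameB, gameA_loop]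
    simp [h]
termination_by i.toNat
decreasing_by
  rw [PySem.Int.floordiv_eq_ediv_of_pos (by norm_num)]
  omega

-- pyRepeat of a nonpositive count is empty
theorem pyRepeat_nonpos (xs : List Char) (n : Int) (h : n ≤ 0) :
    PySem.List.pyRepeat xs n = [] := by
  simp [PySem.List.pyRepeat]
  omega

-- ===== VERDICT (by name: the statement is the Claim_ definition above) =====
theorem game_code_py_spec : Claim_equal_game_code_py := by
  intro i length _
  unfold Spec_game_code_py game_code_py game_code_py_alt
  rw [gameB_eq]
  have e2 : PySem.Int.floordiv (length - ((gameA_loop i []).length : Int)) 2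
      = (length - ((gameA_loop i []).length : Int)) / 2 :=
    PySem.Int.floordiv_eq_ediv_of_pos (by norm_num)
  by_cases h : ((gameA_loop i []).length : Int) < length
  · have hmax : max ((length - ((gameA_loop i []).length : Int)) / 2) 0
        = (length - ((gameA_loop i []).length : Int)) / 2 := by omega
    simp [h, hmax]
  · have hmax : max (PySem.Int.floordiv (length - ((gameA_loop i []).length : Int)) 2) 0 = 0 := by
      rw [e2]; omega
    rw [hmax, pyRepeat_nonpos _ _ (le_refl 0)]
    simp [h]
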